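-- pv_equiv track=rewrite | github.com/ospaceteam/outerspace | client-ai/ai_tools.py | compareBuildStructPlans
-- ===== SOURCE A (Python) =====
-- def compareBuildStructPlans(plan1, plan2):
--     """ Compare both dictionaries. Only difference from normal comparison
--     is that not having key is the same, as having key with value 0.
--
--     Returns Bool value
--
--     """
--     plan1Keys = set(plan1.keys())
--     plan2Keys = set(plan2.keys())
--     for key in plan1Keys - plan2Keys:
--         if plan1[key]:
--             return False
--     for key in plan2Keys - plan1Keys:
--         if plan2[key]:
--             return False
--     for key in plan1Keys & plan2Keys:
--         if not plan1[key] == plan2[key]: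
--             return False
--     return True
-- ===== SOURCE B (Python) =====
-- def compareBuildStructPlans(plan1, plan2):
--     """Single pass over the union of keys; a missing key counts as 0
--     (values are ints here, so truthiness is the same as != 0)."""
--     return all(plan1.get(key, 0) == plan2.get(key, 0)
--                for key in plan1.keys() | plan2.keys())
-- ===== Notes on version B (the rewrite author's own statement) =====
-- stated objective: simpler
-- what changed: Replaces A's three set computations (two differences and an intersection) and three loops by one pass over the union of keys comparing get(key,0) on both sides (values are ints, so A's truthiness test on one-sided keys is the same as != 0).
import Mathlib
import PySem

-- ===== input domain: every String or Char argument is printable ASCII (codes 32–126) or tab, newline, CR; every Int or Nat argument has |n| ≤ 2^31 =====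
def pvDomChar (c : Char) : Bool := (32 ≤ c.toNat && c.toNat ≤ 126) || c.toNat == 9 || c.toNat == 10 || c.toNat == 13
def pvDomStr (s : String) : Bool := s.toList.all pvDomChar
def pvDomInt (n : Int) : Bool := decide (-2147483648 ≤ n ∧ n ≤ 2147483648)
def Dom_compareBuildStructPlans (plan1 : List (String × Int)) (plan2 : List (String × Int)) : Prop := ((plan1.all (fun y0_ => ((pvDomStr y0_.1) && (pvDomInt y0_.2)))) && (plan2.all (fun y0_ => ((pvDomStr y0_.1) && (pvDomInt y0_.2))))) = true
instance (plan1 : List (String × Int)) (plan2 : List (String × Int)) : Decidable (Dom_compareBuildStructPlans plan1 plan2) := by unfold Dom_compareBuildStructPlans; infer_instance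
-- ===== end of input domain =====

-- B replaces A's three key-set computations and three loops by a single pass over
-- the union of keys comparing getD key 0 on both sides (objective: simpler).


-- ===== PORT A =====
def compareBuildStructPlans (plan1 : List (String × Int)) (plan2 : List (String × Int)) : Bool :=
  let d1 := PySem.Dict.ofList plan1
  let d2 := PySem.Dict.ofList plan2
  let plan1Keys := PySem.Set.ofList d1.keys
  let plan2Keys := PySem.Set.ofList d2.keys
  -- each Python 'for … : if …: return False' loop is the corresponding .all
  (PySem.Set.diff plan1Keys plan2Keys).all (fun key => d1.getD key 0 == 0) &&
  ((PySem.Set.diff plan2Keys plan1Keys).all (fun key => d2.getD key 0 == 0) &&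
   (PySem.Set.inter plan1Keys plan2Keys).all (fun key => d1.getD key 0 == d2.getD key 0))

-- ===== PORT B =====
def compareBuildStructPlans_alt (plan1 : List (String × Int)) (plan2 : List (String × Int)) : Bool :=
  let d1 := PySem.Dict.ofList plan1
  let d2 := PySem.Dict.ofList plan2
  (PySem.Set.union (PySem.Set.ofList d1.keys) d2.keys).all
    (fun key => d1.getD key 0 == d2.getD key 0)

-- ===== PRECONDITION & SPEC =====
def Spec_compareBuildStructPlans (plan1 : List (String × Int)) (plan2 : List (String × Int)) (out : Bool) : Prop := out = compareBuildStructPlans_alt plan1 plan2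
instance (plan1 : List (String × Int)) (plan2 : List (String × Int)) (out : Bool) : Decidable (Spec_compareBuildStructPlans plan1 plan2 out) := by unfold Spec_compareBuildStructPlans; infer_instance

-- ===== CLAIM (what is proved, stated in full; the proofs are below) =====
def Claim_equal_compareBuildStructPlans : Prop := ∀ (plan1 : List (String × Int)) (plan2 : List (String × Int)), Dom_compareBuildStructPlans plan1 plan2 → Spec_compareBuildStructPlans plan1 plan2 (compareBuildStructPlans plan1 plan2)

-- ===== LEMMAS AND PROOFS =====

-- a key not in d.keys looks up to the default
theorem pv_getD_not_mem {d : PySem.Dict String Int} {k : String}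
    (h : k ∉ d.keys) : d.getD k 0 = 0 := by
  apply PySem.Dict.getD_of_not_contains
  rw [PySem.Dict.contains_eq_decide_mem_keys]
  simp [h]

theorem pv_main (plan1 plan2 : List (String × Int)) :
    compareBuildStructPlans plan1 plan2 = compareBuildStructPlans_alt plan1 plan2 := by
  rw [Bool.eq_iff_iff]
  simp only [compareBuildStructPlans, compareBuildStructPlans_alt,
    Bool.and_eq_true, List.all_eq_true, PySem.Set.mem_diff, PySem.Set.mem_inter,
    PySem.Set.mem_union, PySem.Set.mem_ofList, beq_iff_eq]
  set d1 := PySem.Dict.ofList plan1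
  set d2 := PySem.Dict.ofList plan2
  constructor
  · rintro ⟨h1, h2, h3⟩ k hk
    by_cases hk1 : k ∈ d1.keys <;> by_cases hk2 : k ∈ d2.keys
    · exact h3 k ⟨hk1, hk2⟩
    · rw [h1 k ⟨hk1, hk2⟩, pv_getD_not_mem hk2]
    · rw [h2 k ⟨hk2, hk1⟩, pv_getD_not_mem hk1]
    · cases hk with
      | inl h => exact absurd h hk1
      | inr h => exact absurd h hk2
  · intro h
    refine ⟨fun k hk => ?_, fun k hk => ?_, fun k hk => ?_⟩
    · rw [h k (Or.inl hk.1), pv_getD_not_mem hk.2]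
    · rw [← h k (Or.inr hk.1), pv_getD_not_mem hk.2]
    · exact h k (Or.inl hk.1)

-- ===== VERDICT (by name: the statement is the Claim_ definition above) =====
theorem compareBuildStructPlans_spec : Claim_equal_compareBuildStructPlans := by
  intro plan1 plan2 _
  exact pv_main plan1 plan2
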